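-- pv_equiv track=rewrite | github.com/Lee-sh98/Coding-Study | 백준/Silver/1652. 누울 자리를 찾아라/누울 자리를 찾아라.py | solve
-- ===== SOURCE A (Python) =====
-- def solve(iterable):
--     result = 0
--     for i in iterable:
--         cnt = 0
--         for j in i:
--             if j == '.':
--                 cnt += 1
--             else:
--                 cnt = 0
--             if cnt==2:
--                 result += 1
--     return result
-- ===== SOURCE B (Python) =====
-- def solve(iterable):
--     # inclusion-exclusion: a maximal dot-run of length L has L-1 '..' windows
--     # and L-2 '...' windows, so (pairs - triples) counts runs of length >= 2.
--     total = 0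
--     for row in iterable:
--         pairs = sum(a == '.' == b for a, b in zip(row, row[1:]))
--         triples = sum(a == '.' == b == c for a, b, c in zip(row, row[1:], row[2:]))
--         total += pairs - triples
--     return total
-- ===== Notes on version B (the rewrite author's own statement) =====
-- stated objective: alternative
-- what changed: Replaces A's stateful run-length counter (trigger cnt==2) by a stateless inclusion-exclusion over sliding windows: per row, count overlapping '..' windows minus overlapping '...' windows, which equals the number of maximal dot-runs of length >= 2.
import Mathlib
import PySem

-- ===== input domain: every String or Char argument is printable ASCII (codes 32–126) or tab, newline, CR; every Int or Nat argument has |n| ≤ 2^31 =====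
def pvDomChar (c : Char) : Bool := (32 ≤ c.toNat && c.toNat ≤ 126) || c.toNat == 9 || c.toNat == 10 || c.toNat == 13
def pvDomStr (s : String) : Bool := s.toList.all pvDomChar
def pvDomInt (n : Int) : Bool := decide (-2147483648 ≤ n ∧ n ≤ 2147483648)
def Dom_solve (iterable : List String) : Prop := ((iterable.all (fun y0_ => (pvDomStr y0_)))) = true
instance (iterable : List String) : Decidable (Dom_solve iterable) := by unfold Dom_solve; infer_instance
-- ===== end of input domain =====

-- B replaces A's stateful run counter by stateless inclusion-exclusion
-- (overlapping '..' windows minus '...' windows per row): alternative, same cost.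

-- ===== PORT A =====
def solve (iterable : List String) : Int :=
  (iterable.foldl (fun result i =>
    ((i.toList.foldl (fun (st : Int × Int) j =>
        let cnt := if j = '.' then st.1 + 1 else 0
        let res := if cnt = 2 then st.2 + 1 else st.2
        (cnt, res)) (0, result))).2) 0)

-- ===== PORT B =====
-- pairs = sum(a == '.' == b for a, b in zip(row, row[1:]))
def pairCount (cs : List Char) : Int :=
  (cs.zip (cs.drop 1)).foldl
    (fun acc ab => acc + (if ab.1 = '.' ∧ ab.2 = '.' then 1 else 0)) 0

-- triples = sum(a == '.' == b == c for a, b, c in zip(row, row[1:], row[2:]))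
def tripleCount (cs : List Char) : Int :=
  (cs.zip ((cs.drop 1).zip (cs.drop 2))).foldl
    (fun acc t => acc + (if t.1 = '.' ∧ t.2.1 = '.' ∧ t.2.2 = '.' then 1 else 0)) 0

def solve_alt (iterable : List String) : Int :=
  iterable.foldl
    (fun total row => total + (pairCount row.toList - tripleCount row.toList)) 0

-- ===== PRECONDITION & SPEC =====
def Spec_solve (iterable : List String) (out : Int) : Prop := out = solve_alt iterable
instance (iterable : List String) (out : Int) : Decidable (Spec_solve iterable out) := by unfold Spec_solve; infer_instance

-- ===== CLAIM (what is proved, stated in full; the proofs are below) =====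
def Claim_equal_solve : Prop := ∀ (iterable : List String), Dom_solve iterable → Spec_solve iterable (solve iterable)

-- ===== LEMMAS AND PROOFS =====
-- A's inner-loop result increment as a function of the running count
def gA (cnt : Int) : List Char → Int
  | [] => 0
  | c :: cs =>
    if c = '.' then (if cnt + 1 = 2 then 1 else 0) + gA (cnt + 1) cs
    else gA 0 cs

theorem innerA_eq (cs : List Char) : ∀ (cnt r : Int),
    (cs.foldl (fun (st : Int × Int) j =>
        let cnt := if j = '.' then st.1 + 1 else 0
        let res := if cnt = 2 then st.2 + 1 else st.2
        (cnt, res)) (cnt, r)).2 = r + gA cnt cs := by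
  induction cs with
  | nil => intro cnt r; simp [gA]
  | cons c cs ih =>
    intro cnt r
    by_cases h : c = '.'
    · by_cases h2 : cnt + 1 = 2 <;>
        simp [List.foldl_cons, h, h2, ih, gA] <;> ring
    · simp [List.foldl_cons, h, gA, ih]

-- recursive forms of the window counts
def hd1 : List Char → Bool
  | a :: _ => a = '.'
  | [] => false

def hd2 : List Char → Bool
  | a :: b :: _ => a = '.' ∧ b = '.'
  | _ => false

def p2 : List Char → Int
  | [] => 0
  | a :: r => (if a = '.' ∧ hd1 r = true then 1 else 0) + p2 r

def p3 : List Char → Int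
  | [] => 0
  | a :: r => (if a = '.' ∧ hd2 r = true then 1 else 0) + p3 r

theorem pairCount_eq (cs : List Char) : ∀ (acc : Int),
    (cs.zip (cs.drop 1)).foldl
      (fun acc ab => acc + (if ab.1 = '.' ∧ ab.2 = '.' then 1 else 0)) acc
      = acc + p2 cs := by
  induction cs with
  | nil => intro acc; simp [p2]
  | cons a r ih =>
    intro acc
    cases r with
    | nil => simp [p2, hd1]
    | cons b r' =>
      simp only [List.drop_succ_cons, List.drop_zero, List.zip_cons_cons,
        List.foldl_cons]
      have := ih (acc + (if a = '.' ∧ b = '.' then 1 else 0))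
      simp only [List.drop_succ_cons, List.drop_zero] at this
      rw [this]
      conv_rhs => rw [p2]
      simp [hd1]
      ring

theorem tripleCount_eq (cs : List Char) : ∀ (acc : Int),
    (cs.zip ((cs.drop 1).zip (cs.drop 2))).foldl
      (fun acc t => acc + (if t.1 = '.' ∧ t.2.1 = '.' ∧ t.2.2 = '.' then 1 else 0)) acc
      = acc + p3 cs := by
  induction cs with
  | nil => intro acc; simp [p3]
  | cons a r ih =>
    intro acc
    cases r with
    | nil => simp [p3, hd2]
    | cons b r' =>
      cases r' with
      | nil => simp [p3, hd2]
      | cons c r'' =>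
        simp only [List.drop_succ_cons, List.drop_zero, List.zip_cons_cons,
          List.foldl_cons]
        have := ih (acc + (if a = '.' ∧ b = '.' ∧ c = '.' then 1 else 0))
        simp only [List.drop_succ_cons, List.drop_zero] at this
        rw [this]
        conv_rhs => rw [p3]
        simp [hd2]
        ring

-- the heart: A's stateful counter equals pairs − triples (with the two boundary corrections)
theorem gA_char (cs : List Char) :
    gA 0 cs = p2 cs - p3 cs
    ∧ gA 1 cs = p2 cs - p3 cs + (if hd1 cs then 1 else 0) - (if hd2 cs then 1 else 0)
    ∧ ∀ (cnt : Int), 2 ≤ cnt → gA cnt cs = p2 cs - p3 cs - (if hd2 cs then 1 else 0) := by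
  induction cs with
  | nil => refine ⟨by simp [gA, p2, p3], by simp [gA, p2, p3, hd1, hd2], ?_⟩
           intro cnt _; simp [gA, p2, p3, hd2]
  | cons c cs ih =>
    obtain ⟨e0, e1, e2⟩ := ih
    by_cases h : c = '.'
    · have hg0 : gA 0 (c :: cs) = gA 1 cs := by simp [gA, h]
      have hg1 : gA 1 (c :: cs) = 1 + gA 2 cs := by norm_num [gA, h]
      have hh1 : hd1 (c :: cs) = true := by simp [hd1, h]
      have hh2 : hd2 (c :: cs) = hd1 cs := by
        cases cs with
        | nil => simp [hd2, hd1]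
        | cons b r => simp [hd2, hd1, h]
      have hp2 : p2 (c :: cs) = (if hd1 cs then 1 else 0) + p2 cs := by
        simp [p2, h]
      have hp3 : p3 (c :: cs) = (if hd2 cs then 1 else 0) + p3 cs := by
        simp [p3, h]
      refine ⟨?_, ?_, ?_⟩
      · rw [hg0, e1, hp2, hp3]; ring
      · rw [hg1, e2 2 (by norm_num), hp2, hp3, hh1, hh2]
        simp only [if_true]
        ring
      · intro cnt hc
        have : gA cnt (c :: cs) = gA (cnt + 1) cs := by
          have : ¬ (cnt + 1 = 2) := by omega
          simp [gA, h, this]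
        rw [this, e2 (cnt + 1) (by omega), hp2, hp3, hh2]
        ring
    · have hg : ∀ k : Int, gA k (c :: cs) = gA 0 cs := by intro k; simp [gA, h]
      have hh1 : hd1 (c :: cs) = false := by simp [hd1, h]
      have hh2 : hd2 (c :: cs) = false := by
        cases cs with
        | nil => simp [hd2]
        | cons b r => simp [hd2, h]
      have hp2 : p2 (c :: cs) = p2 cs := by simp [p2, h]
      have hp3 : p3 (c :: cs) = p3 cs := by simp [p3, h]
      refine ⟨?_, ?_, ?_⟩
      · rw [hg 0, e0, hp2, hp3]
      · rw [hg 1, e0, hp2, hp3, hh1, hh2]; simp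
      · intro cnt _; rw [hg cnt, e0, hp2, hp3, hh2]; simp

theorem row_eq (s : String) (r : Int) :
    ((s.toList.foldl (fun (st : Int × Int) j =>
        let cnt := if j = '.' then st.1 + 1 else 0
        let res := if cnt = 2 then st.2 + 1 else st.2
        (cnt, res)) (0, r))).2
      = r + (pairCount s.toList - tripleCount s.toList) := by
  rw [innerA_eq, (gA_char s.toList).1]
  unfold pairCount tripleCount
  rw [pairCount_eq, tripleCount_eq]
  ring

theorem solve_foldl_eq (l : List String) : ∀ (r : Int),
    (l.foldl (fun result i =>
      ((i.toList.foldl (fun (st : Int × Int) j =>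
          let cnt := if j = '.' then st.1 + 1 else 0
          let res := if cnt = 2 then st.2 + 1 else st.2
          (cnt, res)) (0, result))).2) r)
    = l.foldl (fun total row => total + (pairCount row.toList - tripleCount row.toList)) r := by
  induction l with
  | nil => intro r; rfl
  | cons s l ih =>
    intro r
    rw [List.foldl_cons, List.foldl_cons, ih]
    congr 1
    exact row_eq s r

-- ===== VERDICT (by name: the statement is the Claim_ definition above) =====
theorem solve_spec : Claim_equal_solve := by
  intro iterable _
  unfold Spec_solve solve solve_alt
  exact solve_foldl_eq iterable 0
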